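-- pv_equiv track=rewrite | github.com/Megaman222111/artificial-unintelligence_TriageID | webapp/risk_scoring/features.py | _keyword_hit_count
-- ===== SOURCE A (Python) =====
-- def _keyword_hit_count(entries: list[str], keywords: tuple[str, ...]) -> int:
--     if not entries:
--         return 0
--     hits = 0
--     for item in entries:
--         text = item.lower()
--         if any(k in text for k in keywords):
--             hits += 1
--     return hits
-- ===== SOURCE B (Python) =====
-- def _keyword_hit_count(entries: list[str], keywords: tuple[str, ...]) -> int:
--     # Keyword-outer sieve: keep the entries that have matched NO keyword yet;
--     # each keyword filters the shrinking pool, matched entries are never rescanned.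
--     remaining = [e.lower() for e in entries]
--     for k in keywords:
--         remaining = [t for t in remaining if k not in t]
--     return len(entries) - len(remaining)
-- ===== Notes on version B (the rewrite author's own statement) =====
-- stated objective: alternative
-- what changed: Entry-outer loop with any() over keywords replaced by a keyword-outer sieve: lowercase once, successively filter out entries containing each keyword, answer = total minus survivors, so an entry hit by an early keyword is never scanned again.
import Mathlib
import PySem

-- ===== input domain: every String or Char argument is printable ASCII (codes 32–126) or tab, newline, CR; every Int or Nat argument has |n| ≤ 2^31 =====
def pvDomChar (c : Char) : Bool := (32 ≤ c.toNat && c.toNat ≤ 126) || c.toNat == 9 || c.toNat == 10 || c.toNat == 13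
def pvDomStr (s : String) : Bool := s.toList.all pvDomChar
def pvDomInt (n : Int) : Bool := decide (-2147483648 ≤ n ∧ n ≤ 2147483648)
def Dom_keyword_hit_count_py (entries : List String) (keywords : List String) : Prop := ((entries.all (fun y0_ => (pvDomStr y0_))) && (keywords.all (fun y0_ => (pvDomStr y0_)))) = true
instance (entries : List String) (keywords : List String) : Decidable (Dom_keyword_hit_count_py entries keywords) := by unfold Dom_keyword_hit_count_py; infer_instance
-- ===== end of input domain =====

-- B replaces A's entry-outer loop (any() over keywords per entry) by a keyword-outer sieve that
-- filters a shrinking pool of unmatched entries; objective: alternative (same asymptotic cost).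

-- ===== PORT A =====
def keyword_hit_count_py (entries : List String) (keywords : List String) : Int :=
  if entries = [] then 0
  else
    entries.foldl (fun hits item =>
      let text := PySem.Str.lower item
      if keywords.any (fun k => PySem.Str.isIn k text) then hits + 1 else hits) 0

-- ===== PORT B =====
def keyword_hit_count_py_alt (entries : List String) (keywords : List String) : Int :=
  let remaining :=
    keywords.foldl (fun rem k => rem.filter (fun t => !PySem.Str.isIn k t))
      (entries.map PySem.Str.lower)
  (entries.length : Int) - remaining.length

-- ===== PRECONDITION & SPEC =====
def Spec_keyword_hit_count_py (entries : List String) (keywords : List String) (out : Int) : Prop := out = keyword_hit_count_py_alt entries keywords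
instance (entries : List String) (keywords : List String) (out : Int) : Decidable (Spec_keyword_hit_count_py entries keywords out) := by unfold Spec_keyword_hit_count_py; infer_instance

-- ===== CLAIM (what is proved, stated in full; the proofs are below) =====
def Claim_equal_keyword_hit_count_py : Prop := ∀ (entries : List String) (keywords : List String), Dom_keyword_hit_count_py entries keywords → Spec_keyword_hit_count_py entries keywords (keyword_hit_count_py entries keywords)

-- ===== LEMMAS AND PROOFS =====

-- ===== VERDICT (by name: the statement is the Claim_ definition above) =====
-- foldl of filters = one filter by the conjunction of all predicates
theorem sieve_eq_filter (ks : List String) (ts : List String) :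
    ks.foldl (fun rem k => rem.filter (fun t => !PySem.Str.isIn k t)) ts
      = ts.filter (fun t => ks.all (fun k => !PySem.Str.isIn k t)) := by
  induction ks generalizing ts with
  | nil => simp
  | cons k ks ih =>
      simp only [List.foldl_cons, ih, List.filter_filter]
      apply List.filter_congr
      intro t _
      simp [Bool.and_comm]

-- A's counting fold, with accumulator generalized
theorem foldA_eq_countP (q : String → Bool) (es : List String) (h : Int) :
    es.foldl (fun hits item => if q item then hits + 1 else hits) h
      = h + (es.countP q : Int) := by
  induction es generalizing h with
  | nil => simp
  | cons e es ih =>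
      simp only [List.foldl_cons, List.countP_cons, ih]
      by_cases hq : q e <;> simp [hq] <;> omega

theorem keyword_hit_count_py_spec : Claim_equal_keyword_hit_count_py := by
  intro entries keywords _
  show keyword_hit_count_py entries keywords = keyword_hit_count_py_alt entries keywords
  unfold keyword_hit_count_py keyword_hit_count_py_alt
  rw [sieve_eq_filter]
  have hfold := foldA_eq_countP
    (fun item => keywords.any (fun k => PySem.Str.isIn k (PySem.Str.lower item))) entries 0
  by_cases he : entries = []
  · simp [he]
  · simp only [if_neg he]
    rw [hfold]
    have hlen : (List.filter (fun t => keywords.all (fun k => !PySem.Str.isIn k t))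
        (entries.map PySem.Str.lower)).length
        = entries.countP (fun e => keywords.all (fun k => !PySem.Str.isIn k (PySem.Str.lower e))) := by
      rw [← List.countP_eq_length_filter, List.countP_map]
      rfl
    rw [hlen]
    have hsplit : entries.countP
          (fun item => keywords.any (fun k => PySem.Str.isIn k (PySem.Str.lower item)))
        + entries.countP (fun e => keywords.all (fun k => !PySem.Str.isIn k (PySem.Str.lower e)))
        = entries.length := by
      have hpred : (fun e => keywords.all (fun k => !PySem.Str.isIn k (PySem.Str.lower e)))
          = (fun e => decide ¬((keywords.any
              (fun k => PySem.Str.isIn k (PySem.Str.lower e))) = true)) := by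
        funext e
        simp only [List.all_eq_not_any_not]
        cases h : keywords.any (fun k => PySem.Str.isIn k (PySem.Str.lower e)) <;>
          simp_all [List.any_eq_false]
      rw [hpred, ← List.length_eq_countP_add_countP]
    omega
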